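-- pv_equiv track=rewrite | github.com/ordoghunor/Szakdolgozat-NurseScheduling | kiiratasok.py | kiszamol_napok_hanyan_dolgoznak
-- ===== SOURCE A (Python) =====
-- def kiszamol_napok_hanyan_dolgoznak(s):
--     delelott = []
--     delutan = []
--     ejjel = []
--     for _ in s[0]:
--         delelott.append(0)
--         delutan.append(0)
--         ejjel.append(0)
--     for i in s:
--         for j in range(i.__len__()):
--             match i[j]:
--                 case 1:
--                     delelott[j] += 1
--                 case 2:
--                     delutan[j] += 1
--                 case 3:
--                     ejjel[j] += 1
--     return delelott, delutan, ejjel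
-- ===== SOURCE B (Python) =====
-- def kiszamol_napok_hanyan_dolgoznak(s):
--     n = len(s[0])
--
--     def count_col(k, j):
--         return sum(1 for row in s if j < len(row) and row[j] == k)
--
--     delelott = [count_col(1, j) for j in range(n)]
--     delutan = [count_col(2, j) for j in range(n)]
--     ejjel = [count_col(3, j) for j in range(n)]
--     return delelott, delutan, ejjel
-- ===== Notes on version B (the rewrite author's own statement) =====
-- stated objective: alternative
-- what changed: Column-major counting: for each day-column j, count rows with value 1/2/3 at j via guarded comprehensions, instead of A's row-major single pass mutating preallocated column accumulators in place.
import Mathlib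
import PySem

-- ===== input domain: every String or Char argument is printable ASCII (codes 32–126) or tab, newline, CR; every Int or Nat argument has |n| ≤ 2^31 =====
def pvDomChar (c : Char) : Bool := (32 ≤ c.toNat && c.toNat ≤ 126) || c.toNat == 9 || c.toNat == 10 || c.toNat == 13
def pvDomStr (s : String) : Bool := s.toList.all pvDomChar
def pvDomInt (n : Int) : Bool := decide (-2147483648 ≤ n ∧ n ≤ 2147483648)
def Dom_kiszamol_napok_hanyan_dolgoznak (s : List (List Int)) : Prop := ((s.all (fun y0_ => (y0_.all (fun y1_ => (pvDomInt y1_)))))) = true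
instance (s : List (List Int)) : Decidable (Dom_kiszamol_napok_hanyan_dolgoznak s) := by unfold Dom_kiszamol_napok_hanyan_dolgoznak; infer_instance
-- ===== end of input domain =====

-- B counts column-major (per day j, three guarded counts over the rows) instead of A's
-- row-major in-place accumulator pass; same cost, different decomposition ("alternative").

-- ===== PORT A =====
-- delelott[j] += 1  (index j is in range whenever A returns; Pre_ excludes the IndexError inputs)
def pvInc (l : List Int) (j : Nat) : List Int := l.set j (l.getD j 0 + 1)

-- body of A's inner 'for j in range(len(i)): match i[j]: …'
def pvInnerStep (row : List Int) (acc : List Int × List Int × List Int) (j : Nat) :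
    List Int × List Int × List Int :=
  if row.getD j 0 = 1 then (pvInc acc.1 j, acc.2.1, acc.2.2)
  else if row.getD j 0 = 2 then (acc.1, pvInc acc.2.1 j, acc.2.2)
  else if row.getD j 0 = 3 then (acc.1, acc.2.1, pvInc acc.2.2 j)
  else acc

def kiszamol_napok_hanyan_dolgoznak (s : List (List Int)) : List Int × List Int × List Int :=
  -- 'for _ in s[0]: append 0 to each' (s[0]: Pre_ guarantees s ≠ [])
  let zeros := (s.headD []).foldl
    (fun (acc : List Int × List Int × List Int) (_ : Int) =>
      (acc.1 ++ [0], acc.2.1 ++ [0], acc.2.2 ++ [0]))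
    (([] : List Int), ([] : List Int), ([] : List Int))
  s.foldl (fun acc row => (List.range row.length).foldl (pvInnerStep row) acc) zeros

-- ===== PORT B =====
-- count_col(k, j) = sum(1 for row in s if j < len(row) and row[j] == k)
def pvCountCol (s : List (List Int)) (k : Int) (j : Nat) : Int :=
  s.foldl (fun c row => if j < row.length ∧ row.getD j 0 = k then c + 1 else c) 0

def kiszamol_napok_hanyan_dolgoznak_alt (s : List (List Int)) : List Int × List Int × List Int :=
  let n := (s.headD []).length
  ((List.range n).map (pvCountCol s 1),
   (List.range n).map (pvCountCol s 2),
   (List.range n).map (pvCountCol s 3))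

-- ===== PRECONDITION & SPEC =====
-- Pre_ excludes exactly the inputs on which A raises IndexError: empty s (s[0]), and a shift
-- value 1/2/3 sitting in a row at a column index ≥ len(s[0]) (the accumulator update is out of range).
def Pre_kiszamol_napok_hanyan_dolgoznak (s : List (List Int)) : Prop :=
  s ≠ [] ∧ ∀ r ∈ s, ∀ j < r.length, (s.headD []).length ≤ j →
    (r.getD j 0 ≠ 1 ∧ r.getD j 0 ≠ 2 ∧ r.getD j 0 ≠ 3)
instance (s : List (List Int)) : Decidable (Pre_kiszamol_napok_hanyan_dolgoznak s) := by
  unfold Pre_kiszamol_napok_hanyan_dolgoznak; infer_instance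

def pvWitness_kiszamol_napok_hanyan_dolgoznak : List (List Int) := [[1, 2], [3, 0]]

def Spec_kiszamol_napok_hanyan_dolgoznak (s : List (List Int)) (out : List Int × List Int × List Int) : Prop := out = kiszamol_napok_hanyan_dolgoznak_alt s
instance (s : List (List Int)) (out : List Int × List Int × List Int) : Decidable (Spec_kiszamol_napok_hanyan_dolgoznak s out) := by unfold Spec_kiszamol_napok_hanyan_dolgoznak; infer_instance

-- ===== CLAIM (what is proved, stated in full; the proofs are below) =====
def Claim_equal_kiszamol_napok_hanyan_dolgoznak : Prop := ∀ (s : List (List Int)), Dom_kiszamol_napok_hanyan_dolgoznak s → Pre_kiszamol_napok_hanyan_dolgoznak s → Spec_kiszamol_napok_hanyan_dolgoznak s (kiszamol_napok_hanyan_dolgoznak s)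

-- ===== LEMMAS AND PROOFS =====

theorem pvInc_length (l : List Int) (j : Nat) : (pvInc l j).length = l.length := by
  simp [pvInc]

theorem pvInc_getD (l : List Int) (j i : Nat) (hj : j < l.length) :
    (pvInc l j).getD i 0 = if i = j then l.getD i 0 + 1 else l.getD i 0 := by
  by_cases hi : i < l.length
  · simp only [pvInc, List.getD_eq_getElem?_getD, List.getElem?_set]
    by_cases h : i = j
    · subst h; simp [hi]
    · have h' : j ≠ i := fun e => h e.symm
      simp [h, h', List.getElem?_eq_getElem hi]
  · have h1 : (pvInc l j).length ≤ i := by rw [pvInc_length]; omega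
    have h2 : l.length ≤ i := by omega
    rw [List.getD_eq_default _ _ h1, List.getD_eq_default _ _ h2]
    have : i ≠ j := by omega
    simp [this]

theorem pvInnerStep_len (row : List Int) (acc : List Int × List Int × List Int) (j : Nat) :
    (pvInnerStep row acc j).1.length = acc.1.length ∧
    (pvInnerStep row acc j).2.1.length = acc.2.1.length ∧
    (pvInnerStep row acc j).2.2.length = acc.2.2.length := by
  unfold pvInnerStep
  split_ifs <;> simp [pvInc_length]

-- the effect of A's inner loop over range m on every column j < n
theorem inner_fold (row : List Int) (n : Nat)
    (H : ∀ j' < row.length,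
      (row.getD j' 0 = 1 ∨ row.getD j' 0 = 2 ∨ row.getD j' 0 = 3) → j' < n) :
    ∀ (m : Nat), m ≤ row.length → ∀ (acc : List Int × List Int × List Int),
    acc.1.length = n → acc.2.1.length = n → acc.2.2.length = n →
    ((List.range m).foldl (pvInnerStep row) acc).1.length = n ∧
    ((List.range m).foldl (pvInnerStep row) acc).2.1.length = n ∧
    ((List.range m).foldl (pvInnerStep row) acc).2.2.length = n ∧
    ∀ j < n,
      ((List.range m).foldl (pvInnerStep row) acc).1.getD j 0
        = acc.1.getD j 0 + (if j < m ∧ row.getD j 0 = 1 then 1 else 0) ∧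
      ((List.range m).foldl (pvInnerStep row) acc).2.1.getD j 0
        = acc.2.1.getD j 0 + (if j < m ∧ row.getD j 0 = 2 then 1 else 0) ∧
      ((List.range m).foldl (pvInnerStep row) acc).2.2.getD j 0
        = acc.2.2.getD j 0 + (if j < m ∧ row.getD j 0 = 3 then 1 else 0) := by
  intro m
  induction m with
  | zero =>
    intro _ acc ha hb hc
    refine ⟨ha, hb, hc, ?_⟩
    intro j _
    simp
  | succ m ih =>
    intro hm acc ha hb hc
    have hm' : m ≤ row.length := by omega
    obtain ⟨la, lb, lc, hpt⟩ := ih hm' acc ha hb hc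
    rw [List.range_succ, List.foldl_append, List.foldl_cons, List.foldl_nil]
    generalize hg : (List.range m).foldl (pvInnerStep row) acc = r at la lb lc hpt
    have hmlt : m < row.length := by omega
    have hvcase := H m hmlt
    obtain ⟨sa, sb, sc⟩ := pvInnerStep_len row r m
    refine ⟨by rw [sa]; exact la, by rw [sb]; exact lb, by rw [sc]; exact lc, ?_⟩
    intro j hj
    obtain ⟨pa, pb, pc⟩ := hpt j hj
    by_cases h1 : row.getD m 0 = 1
    · have hmn : m < n := hvcase (Or.inl h1)
      have hstep : pvInnerStep row r m = (pvInc r.1 m, r.2.1, r.2.2) := by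
        unfold pvInnerStep; rw [if_pos h1]
      rw [hstep]
      by_cases hjm : j = m
      · subst hjm
        refine ⟨?_, ?_, ?_⟩
        · show (pvInc r.1 j).getD j 0 = _
          rw [pvInc_getD r.1 j j (by omega), if_pos rfl, pa,
            if_neg (fun h => Nat.lt_irrefl j h.1), if_pos ⟨Nat.lt_succ_self j, h1⟩]
          ring
        · show r.2.1.getD j 0 = _
          have hP : row.getD j 0 ≠ 2 := by rw [h1]; decide
          rw [pb, if_neg (fun h => Nat.lt_irrefl j h.1), if_neg (fun h => hP h.2)]
        · show r.2.2.getD j 0 = _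
          have hP : row.getD j 0 ≠ 3 := by rw [h1]; decide
          rw [pc, if_neg (fun h => Nat.lt_irrefl j h.1), if_neg (fun h => hP h.2)]
      · have hiff : ∀ P : Prop, (j < m + 1 ∧ P) ↔ (j < m ∧ P) := by
          intro P; constructor <;> rintro ⟨u, p⟩ <;> exact ⟨by omega, p⟩
        refine ⟨?_, ?_, ?_⟩
        · show (pvInc r.1 m).getD j 0 = _
          rw [pvInc_getD r.1 m j (by omega), if_neg hjm, pa, if_congr (hiff _) rfl rfl]
        · show r.2.1.getD j 0 = _
          rw [pb, if_congr (hiff _) rfl rfl]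
        · show r.2.2.getD j 0 = _
          rw [pc, if_congr (hiff _) rfl rfl]
    · by_cases h2 : row.getD m 0 = 2
      · have hmn : m < n := hvcase (Or.inr (Or.inl h2))
        have hstep : pvInnerStep row r m = (r.1, pvInc r.2.1 m, r.2.2) := by
          unfold pvInnerStep; rw [if_neg h1, if_pos h2]
        rw [hstep]
        by_cases hjm : j = m
        · subst hjm
          refine ⟨?_, ?_, ?_⟩
          · show r.1.getD j 0 = _
            have hP : row.getD j 0 ≠ 1 := by rw [h2]; decide
            rw [pa, if_neg (fun h => Nat.lt_irrefl j h.1), if_neg (fun h => hP h.2)]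
          · show (pvInc r.2.1 j).getD j 0 = _
            rw [pvInc_getD r.2.1 j j (by omega), if_pos rfl, pb,
              if_neg (fun h => Nat.lt_irrefl j h.1), if_pos ⟨Nat.lt_succ_self j, h2⟩]
            ring
          · show r.2.2.getD j 0 = _
            have hP : row.getD j 0 ≠ 3 := by rw [h2]; decide
            rw [pc, if_neg (fun h => Nat.lt_irrefl j h.1), if_neg (fun h => hP h.2)]
        · have hiff : ∀ P : Prop, (j < m + 1 ∧ P) ↔ (j < m ∧ P) := by
            intro P; constructor <;> rintro ⟨u, p⟩ <;> exact ⟨by omega, p⟩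
          refine ⟨?_, ?_, ?_⟩
          · show r.1.getD j 0 = _
            rw [pa, if_congr (hiff _) rfl rfl]
          · show (pvInc r.2.1 m).getD j 0 = _
            rw [pvInc_getD r.2.1 m j (by omega), if_neg hjm, pb, if_congr (hiff _) rfl rfl]
          · show r.2.2.getD j 0 = _
            rw [pc, if_congr (hiff _) rfl rfl]
      · by_cases h3 : row.getD m 0 = 3
        · have hmn : m < n := hvcase (Or.inr (Or.inr h3))
          have hstep : pvInnerStep row r m = (r.1, r.2.1, pvInc r.2.2 m) := by
            unfold pvInnerStep; rw [if_neg h1, if_neg h2, if_pos h3]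
          rw [hstep]
          by_cases hjm : j = m
          · subst hjm
            refine ⟨?_, ?_, ?_⟩
            · show r.1.getD j 0 = _
              have hP : row.getD j 0 ≠ 1 := by rw [h3]; decide
              rw [pa, if_neg (fun h => Nat.lt_irrefl j h.1), if_neg (fun h => hP h.2)]
            · show r.2.1.getD j 0 = _
              have hP : row.getD j 0 ≠ 2 := by rw [h3]; decide
              rw [pb, if_neg (fun h => Nat.lt_irrefl j h.1), if_neg (fun h => hP h.2)]
            · show (pvInc r.2.2 j).getD j 0 = _
              rw [pvInc_getD r.2.2 j j (by omega), if_pos rfl, pc,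
                if_neg (fun h => Nat.lt_irrefl j h.1), if_pos ⟨Nat.lt_succ_self j, h3⟩]
              ring
          · have hiff : ∀ P : Prop, (j < m + 1 ∧ P) ↔ (j < m ∧ P) := by
              intro P; constructor <;> rintro ⟨u, p⟩ <;> exact ⟨by omega, p⟩
            refine ⟨?_, ?_, ?_⟩
            · show r.1.getD j 0 = _
              rw [pa, if_congr (hiff _) rfl rfl]
            · show r.2.1.getD j 0 = _
              rw [pb, if_congr (hiff _) rfl rfl]
            · show (pvInc r.2.2 m).getD j 0 = _
              rw [pvInc_getD r.2.2 m j (by omega), if_neg hjm, pc, if_congr (hiff _) rfl rfl]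
        · have hstep : pvInnerStep row r m = r := by
            unfold pvInnerStep; rw [if_neg h1, if_neg h2, if_neg h3]
          rw [hstep]
          by_cases hjm : j = m
          · subst hjm
            refine ⟨?_, ?_, ?_⟩
            · rw [pa, if_neg (fun h => Nat.lt_irrefl j h.1), if_neg (fun h => h1 h.2)]
            · rw [pb, if_neg (fun h => Nat.lt_irrefl j h.1), if_neg (fun h => h2 h.2)]
            · rw [pc, if_neg (fun h => Nat.lt_irrefl j h.1), if_neg (fun h => h3 h.2)]
          · have hiff : ∀ P : Prop, (j < m + 1 ∧ P) ↔ (j < m ∧ P) := by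
              intro P; constructor <;> rintro ⟨u, p⟩ <;> exact ⟨by omega, p⟩
            refine ⟨?_, ?_, ?_⟩
            · rw [pa, if_congr (hiff _) rfl rfl]
            · rw [pb, if_congr (hiff _) rfl rfl]
            · rw [pc, if_congr (hiff _) rfl rfl]

theorem countCol_shift (k : Int) (j : Nat) :
    ∀ (rows : List (List Int)) (c : Int),
    rows.foldl (fun c row => if j < row.length ∧ row.getD j 0 = k then c + 1 else c) c
      = c + pvCountCol rows k j := by
  intro rows
  induction rows with
  | nil => intro c; simp [pvCountCol]
  | cons r rs ih =>
    intro c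
    rw [List.foldl_cons,
      show pvCountCol (r :: rs) k j
        = rs.foldl (fun c row => if j < row.length ∧ row.getD j 0 = k then c + 1 else c)
            (if j < r.length ∧ r.getD j 0 = k then (0 : Int) + 1 else 0) from rfl,
      ih, ih]
    generalize pvCountCol rs k j = X
    split_ifs <;> ring

theorem countCol_cons (k : Int) (j : Nat) (r : List Int) (rs : List (List Int)) :
    pvCountCol (r :: rs) k j
      = (if j < r.length ∧ r.getD j 0 = k then 1 else 0) + pvCountCol rs k j := by
  rw [show pvCountCol (r :: rs) k j
        = rs.foldl (fun c row => if j < row.length ∧ row.getD j 0 = k then c + 1 else c)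
            (if j < r.length ∧ r.getD j 0 = k then (0 : Int) + 1 else 0) from rfl,
      countCol_shift]
  split_ifs <;> ring

theorem self_eq_map_getD (l : List Int) (n : Nat) (h : l.length = n) :
    l = (List.range n).map (fun j => l.getD j 0) := by
  apply List.ext_getElem
  · simp [h]
  · intro i hi _
    have hin : i < n := by omega
    simp [List.getElem_map, List.getElem_range, List.getD_eq_getElem?_getD,
      List.getElem?_eq_getElem hi]

-- the main invariant: A's row-major fold equals the column-major counts added to the accumulator
theorem main_fold (n : Nat) :
    ∀ (rows : List (List Int)) (acc : List Int × List Int × List Int),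
    acc.1.length = n → acc.2.1.length = n → acc.2.2.length = n →
    (∀ r ∈ rows, ∀ j' < r.length,
      (r.getD j' 0 = 1 ∨ r.getD j' 0 = 2 ∨ r.getD j' 0 = 3) → j' < n) →
    rows.foldl (fun acc row => (List.range row.length).foldl (pvInnerStep row) acc) acc
      = ((List.range n).map (fun j => acc.1.getD j 0 + pvCountCol rows 1 j),
         (List.range n).map (fun j => acc.2.1.getD j 0 + pvCountCol rows 2 j),
         (List.range n).map (fun j => acc.2.2.getD j 0 + pvCountCol rows 3 j)) := by
  intro rows
  induction rows with
  | nil =>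
    intro acc ha hb hc _
    simp only [List.foldl_nil, pvCountCol]
    rw [Prod.ext_iff, Prod.ext_iff]
    refine ⟨?_, ?_, ?_⟩ <;> simp only [add_zero]
    · exact self_eq_map_getD acc.1 n ha
    · exact self_eq_map_getD acc.2.1 n hb
    · exact self_eq_map_getD acc.2.2 n hc
  | cons r rs ih =>
    intro acc ha hb hc H
    have Hr : ∀ j' < r.length, (r.getD j' 0 = 1 ∨ r.getD j' 0 = 2 ∨ r.getD j' 0 = 3) → j' < n :=
      H r (List.mem_cons_self ..)
    obtain ⟨la, lb, lc, hpt⟩ :=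
      inner_fold r n Hr r.length (le_refl _) acc ha hb hc
    rw [List.foldl_cons]
    rw [ih ((List.range r.length).foldl (pvInnerStep r) acc) la lb lc
      (fun r' hr' => H r' (List.mem_cons_of_mem _ hr'))]
    rw [Prod.ext_iff, Prod.ext_iff]
    refine ⟨?_, ?_, ?_⟩ <;> apply List.map_congr_left <;> intro j hj <;>
      have hjn : j < n := List.mem_range.mp hj
    · obtain ⟨pa, _, _⟩ := hpt j hjn
      rw [pa, countCol_cons 1 j r rs]
      generalize pvCountCol rs 1 j = X
      split_ifs <;> ring
    · obtain ⟨_, pb, _⟩ := hpt j hjn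
      rw [pb, countCol_cons 2 j r rs]
      generalize pvCountCol rs 2 j = X
      split_ifs <;> ring
    · obtain ⟨_, _, pc⟩ := hpt j hjn
      rw [pc, countCol_cons 3 j r rs]
      generalize pvCountCol rs 3 j = X
      split_ifs <;> ring

theorem zeros_fold (l : List Int) :
    ∀ (a b c : List Int),
    l.foldl (fun (acc : List Int × List Int × List Int) (_ : Int) =>
      (acc.1 ++ [0], acc.2.1 ++ [0], acc.2.2 ++ [0])) (a, b, c)
      = (a ++ List.replicate l.length 0, b ++ List.replicate l.length 0,
         c ++ List.replicate l.length 0) := by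
  induction l with
  | nil => intro a b c; simp
  | cons x xs ih =>
    intro a b c
    simp only [List.foldl_cons, List.length_cons]
    rw [ih]
    simp [List.replicate_succ, List.append_assoc]

-- ===== VERDICT (by name: the statement is the Claim_ definition above) =====
theorem kiszamol_napok_hanyan_dolgoznak_spec : Claim_equal_kiszamol_napok_hanyan_dolgoznak := by
  intro s _ hpre
  obtain ⟨hne, hbound⟩ := hpre
  unfold Spec_kiszamol_napok_hanyan_dolgoznak
  unfold kiszamol_napok_hanyan_dolgoznak kiszamol_napok_hanyan_dolgoznak_alt
  simp only []
  rw [zeros_fold]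
  simp only [List.nil_append]
  have H : ∀ r ∈ s, ∀ j' < r.length,
      (r.getD j' 0 = 1 ∨ r.getD j' 0 = 2 ∨ r.getD j' 0 = 3) → j' < (s.headD []).length := by
    intro r hr j' hj' hv
    by_contra hge
    have hge' : (s.headD []).length ≤ j' := by omega
    obtain ⟨h1, h2, h3⟩ := hbound r hr j' hj' hge'
    rcases hv with h | h | h
    · exact h1 h
    · exact h2 h
    · exact h3 h
  rw [main_fold (s.headD []).length s _ (by simp) (by simp) (by simp) H]
  rw [Prod.ext_iff, Prod.ext_iff]
  refine ⟨?_, ?_, ?_⟩ <;> apply List.map_congr_left <;> intro j _ <;>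
    simp
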